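-- pv_equiv track=rewrite | github.com/mad3310/beehive | src/api/resource_letv/resourceVerify.py | __get_host_ip_list
-- ===== SOURCE A (Python) =====
-- def __get_host_ip_list(host_ip_list, container_num):
--
--     ip_list = []
--
--     for i in range(container_num):
--         for index,(host_ip, available_host_num) in enumerate(host_ip_list):
--             if available_host_num > 0:
--                 ip_list.append(host_ip)
--                 host_ip_list[index] = (host_ip, available_host_num - 1)
--             if len(ip_list) == container_num:
--                 return ip_list
--     return ip_list
-- ===== SOURCE B (Python) =====
-- def __get_host_ip_list(host_ip_list, container_num):
--     # Round-based: each pass collects the IPs of all hosts still available in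
--     # that round at once, instead of rescanning and mutating host_ip_list.
--     ip_list = []
--     round_no = 0
--     while len(ip_list) < container_num:
--         round_ips = [ip for ip, avail in host_ip_list if avail > round_no]
--         if not round_ips:
--             break
--         need = container_num - len(ip_list)
--         ip_list.extend(round_ips[:need])
--         round_no += 1
--     return ip_list
-- ===== Notes on version B (the rewrite author's own statement) =====
-- stated objective: alternative
-- what changed: B replaces A's per-IP rescan of host_ip_list with round-based batch collection: each pass filters the hosts still available in that round (avail > round_no) and appends the whole batch at once, truncated to the remaining need, without mutating host_ip_list.
import Mathlib
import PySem

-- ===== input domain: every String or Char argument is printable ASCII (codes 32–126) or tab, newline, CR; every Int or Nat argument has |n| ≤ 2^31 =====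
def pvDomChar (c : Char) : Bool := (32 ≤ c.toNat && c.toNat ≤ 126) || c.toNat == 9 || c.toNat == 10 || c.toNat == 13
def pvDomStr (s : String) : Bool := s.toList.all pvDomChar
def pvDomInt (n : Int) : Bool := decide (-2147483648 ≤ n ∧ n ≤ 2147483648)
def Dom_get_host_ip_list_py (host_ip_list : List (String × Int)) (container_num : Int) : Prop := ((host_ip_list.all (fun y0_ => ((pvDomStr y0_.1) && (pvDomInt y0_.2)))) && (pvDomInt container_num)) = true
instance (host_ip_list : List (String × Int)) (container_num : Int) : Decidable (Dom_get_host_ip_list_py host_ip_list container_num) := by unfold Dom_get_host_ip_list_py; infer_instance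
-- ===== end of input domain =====

-- B collects each round's still-available hosts in one batch instead of A's per-IP
-- rescan-and-decrement of host_ip_list (objective: alternative decomposition).
-- A mutates host_ip_list in place (decrementing availabilities); B does not:
-- the equivalence proved here is about the RETURN value only.

-- ===== PORT A =====
-- inner 'for index,(host_ip, available_host_num) in enumerate(host_ip_list)' loop:
-- Sum.inl (updated host_ip_list, ip_list) = loop finished, Sum.inr = early 'return ip_list'
def pvAInner (container_num : Int) :
    List (String × Int) → List String → (List (String × Int) × List String) ⊕ List String
  | [], ip_list => Sum.inl ([], ip_list)
  | (host_ip, avail) :: rest, ip_list =>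
    let st := if 0 < avail then (avail - 1, ip_list ++ [host_ip]) else (avail, ip_list)
    if (st.2.length : Int) = container_num then Sum.inr st.2
    else
      match pvAInner container_num rest st.2 with
      | Sum.inl (rest', out) => Sum.inl ((host_ip, st.1) :: rest', out)
      | Sum.inr out => Sum.inr out

-- outer 'for i in range(container_num)' loop over the remaining range list
def pvAOuter (container_num : Int) :
    List Int → List (String × Int) → List String → List String
  | [], _, ip_list => ip_list
  | _ :: is, hosts, ip_list =>
    match pvAInner container_num hosts ip_list with
    | Sum.inl (hosts', ip_list') => pvAOuter container_num is hosts' ip_list'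
    | Sum.inr out => out

def get_host_ip_list_py (host_ip_list : List (String × Int)) (container_num : Int) : List String :=
  pvAOuter container_num (PySem.List.pyRange 0 container_num 1) host_ip_list []

-- ===== PORT B =====
-- 'while len(ip_list) < container_num:' loop, encoded with fuel container_num.toNat
-- (each kept iteration appends at least one IP, so at most container_num iterations run)
def pvBLoop (container_num : Int) (host_ip_list : List (String × Int)) :
    Nat → Int → List String → List String
  | 0, _, ip_list => ip_list
  | fuel + 1, round_no, ip_list =>
    if (ip_list.length : Int) < container_num then
      -- round_ips = [ip for ip, avail in host_ip_list if avail > round_no]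
      if (host_ip_list.filter (fun p => decide (round_no < p.2))).map Prod.fst = [] then
        ip_list
      else
        pvBLoop container_num host_ip_list fuel (round_no + 1)
          (ip_list ++ ((host_ip_list.filter (fun p => decide (round_no < p.2))).map
            Prod.fst).take (container_num - ip_list.length).toNat)
    else ip_list

def get_host_ip_list_py_alt (host_ip_list : List (String × Int)) (container_num : Int) : List String :=
  pvBLoop container_num host_ip_list container_num.toNat 0 []

-- ===== PRECONDITION & SPEC =====
def Spec_get_host_ip_list_py (host_ip_list : List (String × Int)) (container_num : Int) (out : List String) : Prop := out = get_host_ip_list_py_alt host_ip_list container_num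
instance (host_ip_list : List (String × Int)) (container_num : Int) (out : List String) : Decidable (Spec_get_host_ip_list_py host_ip_list container_num out) := by unfold Spec_get_host_ip_list_py; infer_instance

-- ===== CLAIM (what is proved, stated in full; the proofs are below) =====
def Claim_equal_get_host_ip_list_py : Prop := ∀ (host_ip_list : List (String × Int)) (container_num : Int), Dom_get_host_ip_list_py host_ip_list container_num → Spec_get_host_ip_list_py host_ip_list container_num (get_host_ip_list_py host_ip_list container_num)

-- ===== LEMMAS AND PROOFS =====

-- one availability decrement of A's inner loop
def pvDec (a : Int) : Int := if 0 < a then a - 1 else a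

def pvStep (p : String × Int) : String × Int := (p.1, pvDec p.2)

-- availability after r full rounds of A
def pvDecIter : Nat → Int → Int
  | 0, a => a
  | r + 1, a => pvDec (pvDecIter r a)

-- IPs a full inner pass of A appends from state hs
def pvRound (hs : List (String × Int)) : List String :=
  (hs.filter (fun p => decide (0 < p.2))).map Prod.fst

theorem pvDecIter_eq (r : Nat) (a : Int) :
    pvDecIter r a = if 0 < a then max (a - (r : Int)) 0 else a := by
  induction r with
  | zero => simp only [pvDecIter]; push_cast; split_ifs <;> omega
  | succ n ih =>
    simp only [pvDecIter, ih, pvDec]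
    push_cast
    split_ifs <;> omega

theorem pvAInner_char (cn : Int) (hs : List (String × Int)) :
    ∀ ips : List String, (ips.length : Int) < cn →
    pvAInner cn hs ips =
      if ((ips.length : Int) + (pvRound hs).length < cn)
      then Sum.inl (hs.map pvStep, ips ++ pvRound hs)
      else Sum.inr ((ips ++ pvRound hs).take cn.toNat) := by
  induction hs with
  | nil =>
    intro ips h
    simp [pvAInner, pvRound, h]
  | cons p rest ih =>
    intro ips h
    obtain ⟨ip, a⟩ := p
    by_cases ha : 0 < a
    · have hround : pvRound ((ip, a) :: rest) = ip :: pvRound rest := by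
        simp [pvRound, ha]
      by_cases heq : ((ips.length : Int) + 1 = cn)
      · -- early return right after this append
        have hc : ¬ ((ips.length : Int) + (pvRound ((ip, a) :: rest)).length < cn) := by
          rw [hround]; simp; omega
        rw [if_neg hc]
        have htake : (ips ++ pvRound ((ip, a) :: rest)).take cn.toNat = ips ++ [ip] := by
          rw [hround]
          have : ips ++ ip :: pvRound rest = (ips ++ [ip]) ++ pvRound rest := by simp
          rw [this, List.take_append]
          have h1 : cn.toNat = ips.length + 1 := by omega
          have h2 : (ips ++ [ip]).take cn.toNat = ips ++ [ip] := by
            apply List.take_of_length_le; simp; omega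
          have h3 : cn.toNat - (ips ++ [ip]).length = 0 := by simp; omega
          rw [h2, h3]; simp
        rw [htake]
        simp only [pvAInner, ha, if_pos, List.length_append, List.length_cons]
        simp [heq]
      · have hlt : ((ips ++ [ip]).length : Int) < cn := by simp; omega
        have := ih (ips ++ [ip]) hlt
        simp only [pvAInner]
        rw [if_pos ha]
        simp only []
        rw [if_neg (by simp; omega : ¬ (((ips ++ [ip]).length : Int) = cn))]
        rw [this, hround]
        have hlen : ((ips ++ [ip]).length : Int) = (ips.length : Int) + 1 := by simp
        by_cases hc : ((ips.length : Int) + 1 + (pvRound rest).length < cn)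
        · rw [if_pos (by omega : ((ips ++ [ip]).length : Int) + (pvRound rest).length < cn)]
          rw [if_pos (by simp; omega)]
          simp [pvStep, pvDec, ha]
        · rw [if_neg (by omega : ¬ (((ips ++ [ip]).length : Int) + (pvRound rest).length < cn))]
          rw [if_neg (by simp; omega)]
          simp
    · have hround : pvRound ((ip, a) :: rest) = pvRound rest := by
        simp [pvRound, ha]
      simp only [pvAInner]
      rw [if_neg ha]
      simp only []
      rw [if_neg (by omega : ¬ ((ips.length : Int) = cn))]
      rw [ih ips h, hround]
      by_cases hc : ((ips.length : Int) + (pvRound rest).length < cn)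
      · rw [if_pos hc, if_pos hc]
        simp [pvStep, pvDec, ha]
      · rw [if_neg hc, if_neg hc]

theorem pvRound_step_empty (hs : List (String × Int)) (h : pvRound hs = []) :
    pvRound (hs.map pvStep) = [] := by
  simp only [pvRound, List.map_eq_nil_iff, List.filter_eq_nil_iff] at *
  intro p hp
  rcases List.mem_map.mp hp with ⟨q, hq, rfl⟩
  have := h q hq
  simp [pvStep, pvDec] at *
  omega

theorem pvAOuter_empty (cn : Int) (L : List Int) :
    ∀ (hs : List (String × Int)) (ips : List String),
    (ips.length : Int) < cn → pvRound hs = [] →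
    pvAOuter cn L hs ips = ips := by
  induction L with
  | nil => intro hs ips _ _; rfl
  | cons x xs ih =>
    intro hs ips h hr
    simp only [pvAOuter]
    rw [pvAInner_char cn hs ips h, hr]
    simp only [List.length_nil, List.append_nil]
    rw [if_pos (by omega : (ips.length : Int) + ((0:Nat) : Int) < cn)]
    exact ih (hs.map pvStep) ips h (pvRound_step_empty hs hr)

theorem pvRound_state (hl : List (String × Int)) (r : Nat) :
    pvRound (hl.map (fun p => (p.1, pvDecIter r p.2))) =
      (hl.filter (fun p => decide ((r : Int) < p.2))).map Prod.fst := by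
  simp only [pvRound, List.filter_map, List.map_map]
  congr 1
  apply List.filter_congr
  intro p _
  simp only [Function.comp, decide_eq_decide]
  rw [pvDecIter_eq]
  split_ifs with hp <;> constructor <;> intro h <;> omega

theorem pvState_step (hl : List (String × Int)) (r : Nat) :
    (hl.map (fun p => (p.1, pvDecIter r p.2))).map pvStep =
      hl.map (fun p => (p.1, pvDecIter (r + 1) p.2)) := by
  rw [List.map_map]
  apply List.map_congr_left
  intro p _
  simp [pvStep, pvDecIter]

theorem pvMain (cn : Int) (hl : List (String × Int)) :
    ∀ (k : Nat) (r : Nat) (ips : List String),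
    (cn - (r : Int)).toNat ≤ k →
    (ips.length : Int) < cn → (r : Int) ≤ (ips.length : Int) →
    pvAOuter cn (PySem.List.pyRange (r : Int) cn 1)
        (hl.map (fun p => (p.1, pvDecIter r p.2))) ips
      = pvBLoop cn hl (cn.toNat - r) (r : Int) ips := by
  intro k
  induction k with
  | zero =>
    intro r ips hk hips hr
    omega
  | succ k ih =>
    intro r ips hk hips hr
    have hrlt : (r : Int) < cn := by omega
    set R := (hl.filter (fun p => decide ((r : Int) < p.2))).map Prod.fst with hR
    have hfuel : cn.toNat - r = (cn.toNat - (r + 1)) + 1 := by omega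
    have hBstep : pvBLoop cn hl (cn.toNat - r) (r : Int) ips =
        if R = [] then ips
        else pvBLoop cn hl (cn.toNat - (r + 1)) ((r : Int) + 1)
          (ips ++ R.take (cn - (ips.length : Int)).toNat) := by
      rw [hfuel]
      simp only [pvBLoop, ← hR]
      rw [if_pos hips]
    rw [PySem.List.pyRange_one_cons hrlt]
    simp only [pvAOuter]
    rw [pvAInner_char cn _ ips hips, pvRound_state, ← hR]
    by_cases hc : (ips.length : Int) + (R.length : Int) < cn
    · rw [if_pos hc]
      show pvAOuter cn (PySem.List.pyRange ((r : Int) + 1) cn 1)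
          ((hl.map (fun p => (p.1, pvDecIter r p.2))).map pvStep) (ips ++ R)
        = pvBLoop cn hl (cn.toNat - r) (r : Int) ips
      rw [hBstep]
      by_cases hRnil : R = []
      · rw [if_pos hRnil, hRnil, List.append_nil]
        apply pvAOuter_empty cn _ _ ips hips
        rw [pvState_step, pvRound_state]
        rw [List.map_eq_nil_iff, List.filter_eq_nil_iff] at hRnil ⊢
        intro p hp
        have hnp := hRnil p hp
        simp only [decide_eq_true_eq] at hnp ⊢
        push_cast
        omega
      · rw [if_neg hRnil]
        have hR1 : 1 ≤ R.length := List.length_pos_of_ne_nil hRnil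
        have htake : R.take (cn - (ips.length : Int)).toNat = R :=
          List.take_of_length_le (by omega)
        rw [htake, pvState_step]
        have := ih (r + 1) (ips ++ R) (by push_cast; omega)
          (by simp only [List.length_append]; push_cast; omega)
          (by simp only [List.length_append]; push_cast; omega)
        push_cast at this ⊢
        exact this
    · rw [if_neg hc]
      show (ips ++ R).take cn.toNat = pvBLoop cn hl (cn.toNat - r) (r : Int) ips
      have hRnil : ¬ R = [] := by
        intro hx; rw [hx] at hc; simp at hc; omega
      rw [hBstep, if_neg hRnil]
      have hfull : ¬ (((ips ++ R.take (cn - (ips.length : Int)).toNat).length : Int) < cn) := by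
        simp only [List.length_append, List.length_take]
        push_cast
        omega
      have hstop : ∀ m, pvBLoop cn hl m ((r : Int) + 1)
          (ips ++ R.take (cn - (ips.length : Int)).toNat)
          = ips ++ R.take (cn - (ips.length : Int)).toNat := by
        intro m
        cases m with
        | zero => rfl
        | succ m => simp only [pvBLoop]; rw [if_neg hfull]
      rw [hstop]
      rw [List.take_append]
      have h1 : ips.take cn.toNat = ips := List.take_of_length_le (by omega)
      have h2 : cn.toNat - ips.length = (cn - (ips.length : Int)).toNat := by omega
      rw [h1, h2]

-- ===== VERDICT (by name: the statement is the Claim_ definition above) =====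
theorem get_host_ip_list_py_spec : Claim_equal_get_host_ip_list_py := by
  unfold Claim_equal_get_host_ip_list_py
  intro hl cn _
  unfold Spec_get_host_ip_list_py get_host_ip_list_py get_host_ip_list_py_alt
  by_cases hcn : 0 < cn
  · have := pvMain cn hl (cn - 0).toNat 0 [] (by omega) (by simpa using hcn) (by simp)
    simpa [pvDecIter] using this
  · rw [PySem.List.pyRange_one_eq_nil (by omega : cn ≤ (0:Int))]
    have h0 : cn.toNat = 0 := by omega
    rw [h0]
    rfl
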